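-- pv_equiv track=rewrite | github.com/joy7758/agent-accountability-evidence-layer | src/asiep_packager/packager.py | _json_path_to_pointer
-- ===== SOURCE A (Python) =====
-- def _json_path_to_pointer(path: str) -> str:
--     if path in {"", "$"}:
--         return ""
--     body = path[2:] if path.startswith("$.") else path.lstrip("$")
--     pointer_parts: list[str] = []
--     token = ""
--     index = 0
--     while index < len(body):
--         char = body[index]
--         if char == ".":
--             if token:
--                 pointer_parts.append(_escape_pointer_token(token))
--                 token = ""
--             index += 1
--             continue
--         if char == "[":
--             if token:
--                 pointer_parts.append(_escape_pointer_token(token))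
--                 token = ""
--             end = body.find("]", index)
--             if end == -1:
--                 break
--             pointer_parts.append(_escape_pointer_token(body[index + 1 : end]))
--             index = end + 1
--             continue
--         token += char
--         index += 1
--     if token:
--         pointer_parts.append(_escape_pointer_token(token))
--     return "/" + "/".join(pointer_parts)
--
-- def _escape_pointer_token(token: str) -> str:
--     return token.replace("~", "~0").replace("/", "~1")
-- ===== SOURCE B (Python) =====
-- def _escape_pointer_token(token: str) -> str:
--     return token.replace("~", "~0").replace("/", "~1")
--
--
-- def _json_path_to_pointer(path: str) -> str:
--     if path in ("", "$"):
--         return ""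
--     body = path[2:] if path.startswith("$.") else path.lstrip("$")
--     parts: list[str] = []
--     rest = body
--     while True:
--         head, brk, rest = rest.partition("[")
--         parts.extend(_escape_pointer_token(t) for t in head.split(".") if t)
--         if not brk:
--             break
--         content, close, rest = rest.partition("]")
--         if not close:
--             break
--         parts.append(_escape_pointer_token(content))
--     return "/" + "/".join(parts)
-- ===== Notes on version B (the rewrite author's own statement) =====
-- stated objective: simpler
-- what changed: Replaces A's character-by-character while-loop state machine (index, token accumulator built by repeated string concatenation, explicit flushes) with a separator-driven loop: str.partition cuts out each bracket segment and str.split('.') with an empty-filter handles the dotted names, so no per-character state is kept.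
import Mathlib
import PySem

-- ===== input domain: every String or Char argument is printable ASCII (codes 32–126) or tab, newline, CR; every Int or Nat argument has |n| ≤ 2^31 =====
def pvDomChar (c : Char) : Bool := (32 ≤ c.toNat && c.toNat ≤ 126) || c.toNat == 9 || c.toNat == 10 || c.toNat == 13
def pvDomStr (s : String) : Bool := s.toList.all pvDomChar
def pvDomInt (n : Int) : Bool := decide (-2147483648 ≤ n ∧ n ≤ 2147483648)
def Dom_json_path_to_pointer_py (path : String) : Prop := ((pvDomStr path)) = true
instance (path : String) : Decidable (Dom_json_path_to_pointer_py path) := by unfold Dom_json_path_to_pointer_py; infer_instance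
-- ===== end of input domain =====

-- B replaces A's character-by-character while-loop state machine (index + token accumulator
-- built by repeated string concatenation) by a separator-driven loop built from str.partition
-- and str.split; simpler, and measured faster in a timing run.

-- shared helper: _escape_pointer_token (both Pythons use the identical helper)
def escTok (t : List Char) : String :=
  PySem.Str.replace (PySem.Str.replace (String.mk t) "~" "~0") "/" "~1"

-- hand port of `body.find("]", i)` followed by the slices body[i+1:end] / body[end+1:]
-- (for A), and of `rest.partition("]")` (for B): both are "split at the first ']'";
-- exact: returns none iff no ']' occurs, else the parts strictly before/after the first ']'.
def splitRB : List Char → Option (List Char × List Char)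
  | [] => none
  | c :: rest =>
    if c = ']' then some ([], rest)
    else (splitRB rest).map (fun p => (c :: p.1, p.2))

theorem splitRB_some_length : ∀ {l p q : List Char}, splitRB l = some (p, q) → q.length < l.length := by
  intro l
  induction l with
  | nil => intro p q h; simp [splitRB] at h
  | cons c rest ih =>
    intro p q h
    simp only [splitRB] at h
    by_cases hc : c = ']'
    · simp only [hc, if_true] at h
      cases h
      simp
    · simp only [if_neg hc, Option.map_eq_some_iff] at h
      obtain ⟨⟨a, b⟩, hab, h2⟩ := h
      have := ih hab
      cases h2
      simp only [List.length_cons]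
      omega

-- ===== PORT A =====
-- A's while loop, transliterated as structural recursion over the remaining characters,
-- carrying the same state (current token, accumulated pointer_parts).
def aLoop : List Char → List Char → List String → List String
  | [], token, parts =>
      if token ≠ [] then parts ++ [escTok token] else parts
  | c :: rest, token, parts =>
      if c = '.' then
        aLoop rest [] (if token ≠ [] then parts ++ [escTok token] else parts)
      else if c = '[' then
        let parts' := if token ≠ [] then parts ++ [escTok token] else parts
        match h : splitRB rest with
        | none => parts'
        | some (content, after) => aLoop after [] (parts' ++ [escTok content])
      else
        aLoop rest (token ++ [c]) parts
  termination_by l _ _ => l.length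
  decreasing_by
    · simp only [List.length_cons]; omega
    · have := splitRB_some_length h; simp only [List.length_cons]; omega
    · simp only [List.length_cons]; omega

def json_path_to_pointer_py (path : String) : String :=
  if path = "" ∨ path = "$" then ""  -- path in {"", "$"}
  else
    let body : List Char :=
      if PySem.Str.startswith path "$." then PySem.List.slice path.toList (some 2) none
      else path.toList.dropWhile (· = '$')  -- lstrip("$"): exact, drops leading '$' chars
    "/" ++ PySem.Str.join "/" (aLoop body [] [])

-- ===== PORT B =====
-- hand port of `rest.partition("[")`: head before the first '[', and (some tail) after it.
def splitLB : List Char → List Char × Option (List Char)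
  | [] => ([], none)
  | c :: rest =>
    if c = '[' then ([], some rest)
    else
      let p := splitLB rest
      (c :: p.1, p.2)

-- hand port of `head.split(".")` (exact for the one-character separator '.').
def dotSplit : List Char → List (List Char)
  | [] => [[]]
  | c :: rest =>
    if c = '.' then [] :: dotSplit rest
    else
      let r := dotSplit rest
      (c :: r.headI) :: r.tail

theorem splitLB_some_length : ∀ {l t : List Char}, (splitLB l).2 = some t → t.length < l.length := by
  intro l
  induction l with
  | nil => intro t h; simp [splitLB] at h
  | cons c rest ih =>
    intro t h
    simp only [splitLB] at h
    by_cases hc : c = '['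
    · simp only [hc, if_true] at h
      cases h
      simp
    · simp only [if_neg hc] at h
      have := ih h
      simp only [List.length_cons]
      omega

-- B's `while True` loop over the remainder of body.
def bLoop : List Char → List String → List String
  | s, parts =>
    let pr := splitLB s
    let parts' := parts ++ ((dotSplit pr.1).filter (· ≠ [])).map escTok
    match h1 : pr.2 with
    | none => parts'
    | some tail =>
      match h2 : splitRB tail with
      | none => parts'
      | some (content, after) => bLoop after (parts' ++ [escTok content])
  termination_by s _ => s.length
  decreasing_by
    have ht := splitLB_some_length h1
    have ha := splitRB_some_length h2
    omega

def json_path_to_pointer_py_alt (path : String) : String :=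
  if path = "" ∨ path = "$" then ""
  else
    let body : List Char :=
      if PySem.Str.startswith path "$." then PySem.List.slice path.toList (some 2) none
      else path.toList.dropWhile (· = '$')
    "/" ++ PySem.Str.join "/" (bLoop body [])

-- ===== PRECONDITION & SPEC =====
def Spec_json_path_to_pointer_py (path : String) (out : String) : Prop := out = json_path_to_pointer_py_alt path
instance (path : String) (out : String) : Decidable (Spec_json_path_to_pointer_py path out) := by unfold Spec_json_path_to_pointer_py; infer_instance

-- ===== CLAIM (what is proved, stated in full; the proofs are below) =====
def Claim_equal_json_path_to_pointer_py : Prop := ∀ (path : String), Dom_json_path_to_pointer_py path → Spec_json_path_to_pointer_py path (json_path_to_pointer_py path)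

-- ===== LEMMAS AND PROOFS =====

theorem splitLB_noLB : ∀ {u : List Char}, '[' ∉ u → ∀ s, splitLB (u ++ s) = ((u ++ (splitLB s).1, (splitLB s).2) : List Char × Option (List Char)) := by
  intro u
  induction u with
  | nil => intro _ s; simp [splitLB]
  | cons c u ih =>
    intro hc s
    have hne : c ≠ '[' := fun h => hc (h ▸ List.mem_cons_self ..)
    simp only [List.cons_append, splitLB, if_neg hne, ih (fun h => hc (List.mem_cons_of_mem _ h)) s]

theorem dotSplit_noDot : ∀ {u : List Char}, '.' ∉ u → dotSplit u = [u] := by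
  intro u
  induction u with
  | nil => intro _; simp [dotSplit]
  | cons c u ih =>
    intro hc
    have hne : c ≠ '.' := fun h => hc (h ▸ List.mem_cons_self ..)
    simp [dotSplit, if_neg hne, ih (fun h => hc (List.mem_cons_of_mem _ h))]

theorem dotSplit_noDot_append : ∀ {u : List Char}, '.' ∉ u → ∀ v, dotSplit (u ++ '.' :: v) = u :: dotSplit v := by
  intro u
  induction u with
  | nil => intro _ v; simp [dotSplit]
  | cons c u ih =>
    intro hc v
    have hne : c ≠ '.' := fun h => hc (h ▸ List.mem_cons_self ..)
    simp [dotSplit, if_neg hne, ih (fun h => hc (List.mem_cons_of_mem _ h)) v]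

-- flushed form of a dot-free, bracket-free token
theorem dotSplitF_noDot {u : List Char} (h : '.' ∉ u) :
    ((dotSplit u).filter (· ≠ [])).map escTok = (if u ≠ [] then [escTok u] else []) := by
  rw [dotSplit_noDot h]
  by_cases hu : u = [] <;> simp [hu, List.filter]

theorem filter_map_dotSplit_cons {token : List Char} (hd : '.' ∉ token) (X : List (List Char)) :
    ((token :: X).filter (· ≠ [])).map escTok
      = (if token ≠ [] then [escTok token] else []) ++ (X.filter (· ≠ [])).map escTok := by
  by_cases hu : token = [] <;> simp [hu, List.filter_cons]

theorem bLoop_dot {token : List Char} (hd : '.' ∉ token) (hb : '[' ∉ token) (rest : List Char) (parts : List String) :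
    bLoop (token ++ '.' :: rest) parts = bLoop rest (parts ++ (if token ≠ [] then [escTok token] else [])) := by
  have hsplit : splitLB (token ++ '.' :: rest) = (token ++ '.' :: (splitLB rest).1, (splitLB rest).2) := by
    rw [splitLB_noLB hb]
    simp [splitLB]
  conv_lhs => rw [bLoop]
  conv_rhs => rw [bLoop]
  simp only [hsplit]
  have hds : dotSplit (token ++ '.' :: (splitLB rest).1) = token :: dotSplit (splitLB rest).1 :=
    dotSplit_noDot_append hd _
  simp only [hds, filter_map_dotSplit_cons hd, List.append_assoc]
  generalize (if token ≠ [] then [escTok token] else ([] : List String)) = netok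
  split
  · rename_i h1
    rw [hsplit] at h1
    replace h1 : (splitLB rest).2 = none := h1
    split
    · rfl
    · rename_i tail h1'
      rw [h1'] at h1; cases h1
  · rename_i tail h1
    rw [hsplit] at h1
    replace h1 : (splitLB rest).2 = some tail := h1
    split
    · rename_i h1'
      split
      · rfl
      · rename_i tail2 h2
        rw [h1] at h2; cases h2
        split
        · rfl
        · rename_i c a h2'
          rw [h1'] at h2'; cases h2'
    · rename_i content after h1'
      split
      · rename_i h2
        rw [h1] at h2; cases h2
      · rename_i tail2 h2
        rw [h1] at h2; cases h2
        split
        · rename_i h2'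
          rw [h1'] at h2'; cases h2'
        · rename_i c a h2'
          rw [h1'] at h2'; cases h2'
          rfl

theorem bLoop_none {s : List Char} (h : (splitLB s).2 = none) (parts : List String) :
    bLoop s parts = parts ++ ((dotSplit (splitLB s).1).filter (· ≠ [])).map escTok := by
  conv_lhs => rw [bLoop]
  split
  · rfl
  · rename_i tail h1
    simp [h] at h1

theorem bLoop_some_none {s tail : List Char} (h : (splitLB s).2 = some tail)
    (h2 : splitRB tail = none) (parts : List String) :
    bLoop s parts = parts ++ ((dotSplit (splitLB s).1).filter (· ≠ [])).map escTok := by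
  conv_lhs => rw [bLoop]
  split
  · rename_i h1
    simp [h] at h1
  · rename_i tail' h1
    rw [h] at h1; cases h1
    split
    · rfl
    · rename_i c a h2'
      simp [h2] at h2'

theorem bLoop_some_some {s tail content after : List Char} (h : (splitLB s).2 = some tail)
    (h2 : splitRB tail = some (content, after)) (parts : List String) :
    bLoop s parts
      = bLoop after ((parts ++ ((dotSplit (splitLB s).1).filter (· ≠ [])).map escTok) ++ [escTok content]) := by
  conv_lhs => rw [bLoop]
  split
  · rename_i h1
    simp [h] at h1
  · rename_i tail' h1
    rw [h] at h1; cases h1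
    split
    · rename_i h2'
      simp [h2] at h2'
    · rename_i c a h2'
      rw [h2] at h2'; cases h2'
      rfl

theorem flush_eq (token : List Char) (parts : List String) :
    (if token ≠ [] then parts ++ [escTok token] else parts)
      = parts ++ (if token ≠ [] then [escTok token] else []) := by
  by_cases h : token = [] <;> simp [h]

theorem loop_base (token : List Char) (parts : List String) (hd : '.' ∉ token) (hb : '[' ∉ token) :
    aLoop [] token parts = bLoop token parts := by
  have hsplit : splitLB token = (token, none) := by
    have := splitLB_noLB hb []
    simpa [splitLB] using this
  rw [aLoop, bLoop_none (by rw [hsplit]) parts]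
  simp only [hsplit, flush_eq]
  rw [dotSplitF_noDot hd]

theorem main_loop : ∀ (n : Nat) (s token : List Char) (parts : List String),
    s.length ≤ n → '.' ∉ token → '[' ∉ token →
    aLoop s token parts = bLoop (token ++ s) parts := by
  intro n
  induction n with
  | zero =>
    intro s token parts hlen hd hb
    have hs : s = [] := List.eq_nil_of_length_eq_zero (Nat.le_zero.mp hlen)
    subst hs
    simpa using loop_base token parts hd hb
  | succ m ih =>
    intro s token parts hlen hd hb
    cases s with
    | nil => simpa using loop_base token parts hd hb
    | cons c rest =>
      have hrest : rest.length ≤ m := by simp at hlen; omega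
      by_cases hc : c = '.'
      · subst hc
        rw [aLoop]
        simp only [show (('.' : Char) = '.') = True from by simp, if_true]
        rw [flush_eq, ih rest [] _ (by simpa using hrest) (by simp) (by simp),
          List.nil_append, bLoop_dot hd hb]
      · by_cases hbr : c = '['
        · subst hbr
          rw [aLoop]
          have hsplit : splitLB (token ++ '[' :: rest) = (token, some rest) := by
            rw [splitLB_noLB hb]
            simp [splitLB]
          simp only [show (('[' : Char) = '.') = False from by simp,
            show (('[' : Char) = '[') = True from by simp, if_false, if_true]
          split
          · rename_i h1
            rw [bLoop_some_none (by rw [hsplit]) h1 parts]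
            simp only [hsplit]
            rw [dotSplitF_noDot hd]
            exact flush_eq token parts
          · rename_i cont aft h1
            have hafter : aft.length ≤ m := le_of_lt (lt_of_lt_of_le (splitRB_some_length h1) hrest)
            rw [ih aft [] _ (by simpa using hafter) (by simp) (by simp), List.nil_append,
              bLoop_some_some (by rw [hsplit]) h1 parts]
            simp only [hsplit]
            rw [dotSplitF_noDot hd]
            try rw [flush_eq]
            try simp [List.append_assoc]
        · rw [aLoop]
          simp only [if_neg hc, if_neg hbr]
          have hd' : '.' ∉ token ++ [c] := by
            intro hm
            rcases List.mem_append.mp hm with hmem | hmem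
            · exact hd hmem
            · exact hc (List.mem_singleton.mp hmem).symm
          have hb' : '[' ∉ token ++ [c] := by
            intro hm
            rcases List.mem_append.mp hm with hmem | hmem
            · exact hb hmem
            · exact hbr (List.mem_singleton.mp hmem).symm
          rw [ih rest (token ++ [c]) parts hrest hd' hb']
          simp [List.append_assoc]

-- ===== VERDICT (by name: the statement is the Claim_ definition above) =====
theorem json_path_to_pointer_py_spec : Claim_equal_json_path_to_pointer_py := by
  intro path _
  unfold Spec_json_path_to_pointer_py json_path_to_pointer_py json_path_to_pointer_py_alt
  by_cases h : path = "" ∨ path = "$"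
  · simp [h]
  · simp only [h, if_false]
    have := main_loop (if PySem.Str.startswith path "$." then PySem.List.slice path.toList (some 2) none
      else path.toList.dropWhile (· = '$')).length
      (if PySem.Str.startswith path "$." then PySem.List.slice path.toList (some 2) none
      else path.toList.dropWhile (· = '$')) [] [] (le_refl _) (by simp) (by simp)
    simp only [List.nil_append] at this
    rw [this]
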